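-- pv_equiv track=rewrite | github.com/ParasRochiya/CBSE-Marks-Analyzer | app.py | parse_candidate_line
-- ===== SOURCE A (Python) =====
-- def parse_candidate_line(line):
--     roll_no = line[:8].strip()
--     remaining = line[8:].lstrip()
--     if not remaining:
--         return roll_no, '', '', [], '', ''
--
--     gender = remaining[0]
--     remaining = remaining[1:].lstrip()
--     parts = remaining.split()
--     name_parts = []
--     subjects = []
--     result = ''
--     comp_sub = []
--     found_subject = False
--
--     i = 0
--     while i < len(parts):
--         token = parts[i]
--         if len(token) == 3 and token.isdigit():
--             found_subject = True
--             subjects.append(token)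
--         elif not found_subject:
--             name_parts.append(token)
--         else:
--             if token == 'ESSENTIAL' and i + 1 < len(parts) and parts[i+1] == 'REPEAT':
--                 result = 'ESSENTIAL REPEAT'
--                 i += 1
--                 comp_sub = parts[i+1:]
--                 break
--             elif token in ['PASS', 'COMP', 'UFM', 'ABST', 'REPEAT']:
--                 result = token
--                 comp_sub = parts[i+1:]
--                 break
--         i += 1
--
--     name = ' '.join(name_parts)
--     return roll_no, gender, name, subjects, result, ' '.join(comp_sub)
-- ===== SOURCE B (Python) =====
-- RESULT_KEYWORDS = ('PASS', 'COMP', 'UFM', 'ABST', 'REPEAT')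
--
--
-- def parse_candidate_line(line):
--     roll_no = line[:8].strip()
--     remaining = line[8:].lstrip()
--     if not remaining:
--         return roll_no, '', '', [], '', ''
--     gender = remaining[0]
--     parts = remaining[1:].split()
--
--     def is_subject(t):
--         return len(t) == 3 and t.isdigit()
--
--     # boundary: index of the first subject-code token (everything before is the name)
--     b = next((i for i, t in enumerate(parts) if is_subject(t)), len(parts))
--     tail = parts[b:]
--
--     # first result marker in the tail: a result keyword, or 'ESSENTIAL' followed by 'REPEAT'
--     hit = next(((j, t) for j, t in enumerate(tail)
--                 if t in RESULT_KEYWORDS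
--                 or (t == 'ESSENTIAL' and tail[j + 1:j + 2] == ['REPEAT'])),
--                None)
--     if hit is None:
--         subjects = [t for t in tail if is_subject(t)]
--         result, comp = '', ''
--     else:
--         j, t = hit
--         subjects = [x for x in tail[:j] if is_subject(x)]
--         if t == 'ESSENTIAL':
--             result, comp = 'ESSENTIAL REPEAT', ' '.join(tail[j + 2:])
--         else:
--             result, comp = t, ' '.join(tail[j + 1:])
--     return roll_no, gender, ' '.join(parts[:b]), subjects, result, comp
-- ===== Notes on version B (the rewrite author's own statement) =====
-- stated objective: alternative
-- what changed: Replaces A's single stateful flag-and-break scan by a declarative decomposition: locate the first subject token (boundary) and the first result marker in the tail as two index searches, then build the name by slicing, the subjects by filtering the segment before the marker, and comp by slicing after it; no found_subject flag, no break loop, no interleaved accumulators.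
import Mathlib
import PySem

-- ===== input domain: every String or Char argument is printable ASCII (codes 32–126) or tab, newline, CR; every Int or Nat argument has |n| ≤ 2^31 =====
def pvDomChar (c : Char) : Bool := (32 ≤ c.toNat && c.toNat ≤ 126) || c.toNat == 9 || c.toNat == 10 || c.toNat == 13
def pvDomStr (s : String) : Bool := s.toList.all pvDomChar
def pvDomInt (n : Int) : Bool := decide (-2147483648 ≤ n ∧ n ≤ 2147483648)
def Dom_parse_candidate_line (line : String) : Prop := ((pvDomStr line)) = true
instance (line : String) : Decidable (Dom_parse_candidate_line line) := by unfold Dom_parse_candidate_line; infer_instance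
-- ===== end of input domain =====

-- B replaces A's single found_subject-flagged break loop by two index searches
-- (first subject token, first result marker) plus slicing and filtering; objective: alternative.


-- ===== PORT A =====
-- A's single while-loop over parts with the found_subject flag (index loop ported
-- as structural recursion on the remaining suffix; parts[i+1]/parts[i+1:] become head?/tail).
def loopA : List String → List String → List String → Bool →
    List String × List String × String × List String
  | [], names, subs, _ => (names, subs, "", [])
  | t :: rest, names, subs, found =>
    if PySem.Str.len t == 3 && PySem.Str.strIsdigit t then
      loopA rest names (subs ++ [t]) true
    else if !found then
      loopA rest (names ++ [t]) subs found
    else if t == "ESSENTIAL" && rest.head? == some "REPEAT" then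
      (names, subs, "ESSENTIAL REPEAT", rest.tail)
    else if ["PASS", "COMP", "UFM", "ABST", "REPEAT"].contains t then
      (names, subs, t, rest)
    else
      loopA rest names subs found

def parse_candidate_line (line : String) : String × String × String × List String × String × String :=
  let roll_no := PySem.Str.strip (PySem.Str.slice line none (some 8))
  let remaining := PySem.Str.lstrip (PySem.Str.slice line (some 8) none)
  if remaining == "" then (roll_no, "", "", [], "", "")
  else
    let gender := match PySem.Str.pyGet? remaining 0 with
      | some c => String.ofList [c]
      | none => ""
    let remaining2 := PySem.Str.lstrip (PySem.Str.slice remaining (some 1) none)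
    let parts := PySem.Str.split₀ remaining2
    let r := loopA parts [] [] false
    (roll_no, gender, PySem.Str.join " " r.1, r.2.1, r.2.2.1, PySem.Str.join " " r.2.2.2)

-- ===== PORT B =====
def isSubjectB (t : String) : Bool := PySem.Str.len t == 3 && PySem.Str.strIsdigit t

-- Source B's `next((i for i,t in enumerate(parts) if is_subject(t)), len(parts))`:
-- index of the first subject-code token (len parts if none)
def bfindB : List String → Nat
  | [] => 0
  | t :: rest => if isSubjectB t then 0 else bfindB rest + 1

-- Source B's `next(((j,t) for j,t in enumerate(tail) if …), None)`: first (index, token)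
-- whose token is a result keyword or 'ESSENTIAL' followed by 'REPEAT'
-- (the slice lookahead `tail[j+1:j+2] == ['REPEAT']` is exactly `rest.head? = some "REPEAT"`)
def stopFindB : List String → Option (Nat × String)
  | [] => none
  | t :: rest =>
    if ["PASS", "COMP", "UFM", "ABST", "REPEAT"].contains t
        || (t == "ESSENTIAL" && rest.head? == some "REPEAT") then some (0, t)
    else (stopFindB rest).map (fun p => (p.1 + 1, p.2))

def parse_candidate_line_alt (line : String) : String × String × String × List String × String × String :=
  let roll_no := PySem.Str.strip (PySem.Str.slice line none (some 8))
  let remaining := PySem.Str.lstrip (PySem.Str.slice line (some 8) none)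
  if remaining == "" then (roll_no, "", "", [], "", "")
  else
    let gender := match PySem.Str.pyGet? remaining 0 with
      | some c => String.ofList [c]
      | none => ""
    let parts := PySem.Str.split₀ (PySem.Str.lstrip (PySem.Str.slice remaining (some 1) none))
    let b := bfindB parts
    let tail := parts.drop b          -- parts[b:], b ≥ 0
    let name := PySem.Str.join " " (parts.take b)   -- ' '.join(parts[:b])
    match stopFindB tail with
    | none => (roll_no, gender, name, tail.filter isSubjectB, "", "")
    | some (j, t) =>
      let subjects := (tail.take j).filter isSubjectB
      if t == "ESSENTIAL" then
        (roll_no, gender, name, subjects, "ESSENTIAL REPEAT",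
          PySem.Str.join " " (tail.drop (j + 2)))
      else
        (roll_no, gender, name, subjects, t, PySem.Str.join " " (tail.drop (j + 1)))

-- ===== PRECONDITION & SPEC =====
def Spec_parse_candidate_line (line : String) (out : String × String × String × List String × String × String) : Prop := out = parse_candidate_line_alt line
instance (line : String) (out : String × String × String × List String × String × String) : Decidable (Spec_parse_candidate_line line out) := by unfold Spec_parse_candidate_line; infer_instance

-- ===== CLAIM (what is proved, stated in full; the proofs are below) =====
def Claim_equal_parse_candidate_line : Prop := ∀ (line : String), Dom_parse_candidate_line line → Spec_parse_candidate_line line (parse_candidate_line line)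

-- ===== LEMMAS AND PROOFS =====

-- abbreviation of B's tail computation, used to relate A's loop to B
def tailB (tl : List String) : List String × String × List String :=
  match stopFindB tl with
  | none => (tl.filter isSubjectB, "", [])
  | some (j, t) =>
    ((tl.take j).filter isSubjectB,
     if t == "ESSENTIAL" then "ESSENTIAL REPEAT" else t,
     if t == "ESSENTIAL" then tl.drop (j + 2) else tl.drop (j + 1))

-- a subject-code token is never a result keyword and never 'ESSENTIAL'
lemma subj_not_marker {r : Option String} {t : String} (h : isSubjectB t = true) :
    (["PASS", "COMP", "UFM", "ABST", "REPEAT"].contains t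
      || (t == "ESSENTIAL" && r == some "REPEAT")) = false := by
  have hP : t ≠ "PASS" := by rintro rfl; exact absurd h (by decide)
  have hC : t ≠ "COMP" := by rintro rfl; exact absurd h (by decide)
  have hU : t ≠ "UFM" := by rintro rfl; exact absurd h (by decide)
  have hA : t ≠ "ABST" := by rintro rfl; exact absurd h (by decide)
  have hR : t ≠ "REPEAT" := by rintro rfl; exact absurd h (by decide)
  have hE : t ≠ "ESSENTIAL" := by rintro rfl; exact absurd h (by decide)
  simp [List.contains_eq_mem, hP, hC, hU, hA, hR, hE]

-- with the flag set, A's loop never touches names and computes exactly B's tail values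
lemma loopA_true (rest : List String) : ∀ (names subs : List String),
    loopA rest names subs true =
      (names, subs ++ (tailB rest).1, (tailB rest).2.1, (tailB rest).2.2) := by
  induction rest with
  | nil => intro names subs; simp [loopA, tailB, stopFindB]
  | cons t rest ih =>
    intro names subs
    rw [loopA]
    by_cases h1 : (PySem.Str.len t == 3 && PySem.Str.strIsdigit t) = true
    · have hs : isSubjectB t = true := by simpa [isSubjectB] using h1
      rw [if_pos h1, ih]
      have hm := @subj_not_marker rest.head? t hs
      simp only [tailB, stopFindB, hm, Bool.false_eq_true, if_false]
      cases hsf : stopFindB rest with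
      | none => simp [hs]
      | some p =>
        rcases p with ⟨j, tk⟩
        simp [hs, List.take_succ_cons, List.drop_succ_cons]
    · have hs : isSubjectB t = false := by simpa [isSubjectB] using h1
      rw [if_neg h1, if_neg (show ¬ ((!true) = true) by decide)]
      by_cases h2 : (t == "ESSENTIAL" && rest.head? == some "REPEAT") = true
      · have ht : t = "ESSENTIAL" := eq_of_beq ((Bool.and_eq_true _ _).mp h2).1
        rw [if_pos h2]
        subst ht
        have hhd : rest.head? = some "REPEAT" := by simpa using h2
        have hstop : stopFindB ("ESSENTIAL" :: rest) = some (0, "ESSENTIAL") := by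
          simp [stopFindB, hhd]
        simp [tailB, hstop, List.drop_one]
      · rw [if_neg h2]
        by_cases h3 : (["PASS", "COMP", "UFM", "ABST", "REPEAT"].contains t) = true
        · have h3' : t = "PASS" ∨ t = "COMP" ∨ t = "UFM" ∨ t = "ABST" ∨ t = "REPEAT" := by
            simpa using h3
          rw [if_pos h3]
          rcases h3' with rfl | rfl | rfl | rfl | rfl <;> simp [tailB, stopFindB]
        · rw [if_neg h3, ih]
          have hcond : (["PASS", "COMP", "UFM", "ABST", "REPEAT"].contains t
              || (t == "ESSENTIAL" && rest.head? == some "REPEAT")) = false := by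
            simp only [Bool.or_eq_false_iff]
            exact ⟨by simpa using h3, by simpa using h2⟩
          simp only [tailB, stopFindB, hcond, Bool.false_eq_true, if_false]
          cases hsf : stopFindB rest with
          | none => simp [hs]
          | some p =>
            rcases p with ⟨j, tk⟩
            simp [hs, List.take_succ_cons, List.drop_succ_cons]

-- with the flag clear, A's loop puts the tokens before the first subject into names
-- and then computes B's tail values on the suffix from the boundary on
lemma loopA_false (parts : List String) : ∀ (names : List String),
    loopA parts names [] false =
      (names ++ parts.take (bfindB parts),
       (tailB (parts.drop (bfindB parts))).1,
       (tailB (parts.drop (bfindB parts))).2.1,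
       (tailB (parts.drop (bfindB parts))).2.2) := by
  induction parts with
  | nil => intro names; simp [loopA, bfindB, tailB, stopFindB]
  | cons t rest ih =>
    intro names
    rw [loopA]
    by_cases h1 : (PySem.Str.len t == 3 && PySem.Str.strIsdigit t) = true
    · have hs : isSubjectB t = true := by simpa [isSubjectB] using h1
      rw [if_pos h1, loopA_true]
      have hb : bfindB (t :: rest) = 0 := by simp [bfindB, hs]
      have hm := @subj_not_marker rest.head? t hs
      rw [hb]
      simp only [List.take_zero, List.append_nil, List.drop_zero]
      simp only [tailB, stopFindB, hm, Bool.false_eq_true, if_false]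
      cases hsf : stopFindB rest with
      | none => simp [hs]
      | some p =>
        rcases p with ⟨j, tk⟩
        simp [hs, List.take_succ_cons, List.drop_succ_cons]
    · have hs : isSubjectB t = false := by simpa [isSubjectB] using h1
      rw [if_neg h1, if_pos (show (!false) = true from rfl), ih]
      have hb : bfindB (t :: rest) = bfindB rest + 1 := by simp [bfindB, hs]
      rw [hb]
      simp [List.take_succ_cons, List.drop_succ_cons]

-- ===== VERDICT (by name: the statement is the Claim_ definition above) =====
set_option maxHeartbeats 1000000 in
theorem parse_candidate_line_spec : Claim_equal_parse_candidate_line := by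
  intro line _
  unfold Spec_parse_candidate_line parse_candidate_line parse_candidate_line_alt
  dsimp only
  split
  next => rfl
  next =>
    rw [loopA_false]
    generalize (PySem.Str.split₀ (PySem.Str.lstrip (PySem.Str.slice
      (PySem.Str.lstrip (PySem.Str.slice line (some 8) none)) (some 1) none))) = p
    cases hsf : stopFindB (p.drop (bfindB p)) with
    | none => simp [tailB, hsf, PySem.Str.join]
    | some q =>
      rcases q with ⟨j, t⟩
      by_cases ht : t = "ESSENTIAL"
      · simp [tailB, hsf, ht]
      · simp [tailB, hsf, ht]
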